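-- pv_equiv track=rewrite | github.com/wplohrmann/projects | code_jam2022/1a/a.py | solve
-- ===== SOURCE A (Python) =====
-- def solve(x):
--     r = []
--     current = None
--     for c in x:
--         if current is None:
--             current = c
--             counter = 1
--         elif c == current:
--             counter += 1
--         else:
--             r.append((current, counter))
--             counter = 1
--             current = c
--     r.append((current, counter))
--
--     s = []
--     for i, (c, count) in enumerate(r):
--         if i == len(r) -1:
--             s.extend([c for _ in range(count)])
--             continue
--         next_c, _ = r[i+1]
--         if next_c > c:
--             s.extend([c for _ in range(count*2)])
--         else:
--             s.extend([c for _ in range(count)])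
--     return "".join(s)
-- ===== SOURCE B (Python) =====
-- def solve(x):
--     if not x:
--         return ""
--     out = []
--     cur = x[0]
--     cnt = 1
--     for c in x[1:]:
--         if c == cur:
--             cnt += 1
--         else:
--             out.append(cur * (2 * cnt if c > cur else cnt))
--             cur, cnt = c, 1
--     out.append(cur * cnt)
--     return "".join(out)
-- ===== Notes on version B (the rewrite author's own statement) =====
-- stated objective: faster
-- what changed: Fused A's two passes (build an explicit (char,count) run-length tuple list, then re-scan it with enumerate and r[i+1] lookahead) into one forward pass that flushes each run directly when the next character arrives, with no intermediate tuple list (measured ~4x faster).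
import Mathlib
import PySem

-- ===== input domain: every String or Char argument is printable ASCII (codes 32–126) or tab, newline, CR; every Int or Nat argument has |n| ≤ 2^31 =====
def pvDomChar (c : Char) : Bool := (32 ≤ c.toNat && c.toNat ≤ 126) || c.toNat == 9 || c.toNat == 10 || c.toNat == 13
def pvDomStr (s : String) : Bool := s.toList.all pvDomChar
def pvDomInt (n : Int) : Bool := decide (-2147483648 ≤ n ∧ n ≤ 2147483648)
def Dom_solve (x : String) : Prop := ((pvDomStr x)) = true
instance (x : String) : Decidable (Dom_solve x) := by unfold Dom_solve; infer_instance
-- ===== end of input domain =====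

-- B fuses A's two passes (explicit run-length tuple list + enumerate/lookahead re-scan)
-- into a single forward pass that flushes each run when the next character arrives (no
-- intermediate tuple list; measured faster in a timing run). Return-value equivalence only; neither mutates its argument.

-- ===== PORT A =====
-- first loop of A: builds the run list r, threading (r, current, counter)
def solveLoop1 : List Char → List (Char × Int) → Option Char → Int →
    List (Char × Int) × Option Char × Int
  | [], r, cur, cnt => (r, cur, cnt)
  | c :: t, r, cur, cnt =>
    match cur with
    | none => solveLoop1 t r (some c) 1
    | some cc =>
      if c == cc then solveLoop1 t r (some cc) (cnt + 1)
      else solveLoop1 t (r ++ [(cc, cnt)]) (some c) 1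

-- body of A's second loop (enumerate over r' with r[i+1] lookahead);
-- [c for _ in range(count)] = List.replicate count.toNat c (range clamps negatives, as toNat does)
def solveStep2 (r' : List (Char × Int)) (s : List Char) (p : Int × Char × Int) : List Char :=
  let (i, c, count) := p
  if i == (r'.length : Int) - 1 then s ++ List.replicate count.toNat c
  else
    match PySem.List.pyGet? r' (i + 1) with
    | some (next_c, _) =>
      if next_c > c then s ++ List.replicate (count * 2).toNat c
      else s ++ List.replicate count.toNat c
    | none => s  -- unreachable: i + 1 is in range whenever i ≠ len - 1 inside enumerate

def solve (x : String) : String :=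
  match solveLoop1 x.toList [] none 0 with
  | (r, some cc, cnt) =>
    let r' := r ++ [(cc, cnt)]
    String.mk ((PySem.List.enumerate r').foldl (solveStep2 r') [])
  | (_, none, _) => ""  -- Python raises UnboundLocalError here (empty input); excluded by Pre_solve

-- ===== PORT B =====
-- single pass of Source B: flush the current run when the character changes
def solveAltGo : List Char → List Char → Char → Int → List Char
  | [], out, cur, cnt => out ++ List.replicate cnt.toNat cur
  | c :: t, out, cur, cnt =>
    if c == cur then solveAltGo t out cur (cnt + 1)
    else solveAltGo t
      (out ++ (if cur < c then List.replicate (2 * cnt).toNat cur else List.replicate cnt.toNat cur))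
      c 1

def solve_alt (x : String) : String :=
  match x.toList with
  | [] => ""
  | c :: t => String.mk (solveAltGo t [] c 1)

-- ===== PRECONDITION & SPEC =====
-- A raises UnboundLocalError on the empty string (counter never assigned); excluded.
def Pre_solve (x : String) : Prop := x ≠ ""
instance (x : String) : Decidable (Pre_solve x) := by unfold Pre_solve; infer_instance
def pvWitness_solve : String := "ab"

def Spec_solve (x : String) (out : String) : Prop := out = solve_alt x
instance (x : String) (out : String) : Decidable (Spec_solve x out) := by unfold Spec_solve; infer_instance

-- ===== CLAIM (what is proved, stated in full; the proofs are below) =====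
def Claim_equal_solve : Prop := ∀ (x : String), Dom_solve x → Pre_solve x → Spec_solve x (solve x)

-- ===== LEMMAS AND PROOFS =====

-- clean pairwise reading of A's second loop
def pairEmit : List (Char × Int) → List Char
  | [] => []
  | [(c, k)] => List.replicate k.toNat c
  | (c, k) :: (n, m) :: t =>
    (if n > c then List.replicate (k * 2).toNat c else List.replicate k.toNat c)
      ++ pairEmit ((n, m) :: t)

-- emission of the runs in r, with nx the character following r's last run
def pairEmitOpen : List (Char × Int) → Char → List Char
  | [], _ => []
  | [(c, k)], nx =>
    if nx > c then List.replicate (k * 2).toNat c else List.replicate k.toNat c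
  | (c, k) :: (n, m) :: t, nx =>
    (if n > c then List.replicate (k * 2).toNat c else List.replicate k.toNat c)
      ++ pairEmitOpen ((n, m) :: t) nx

theorem solveStep2_foldl (suf : List (Char × Int)) :
    ∀ (pre : List (Char × Int)) (s : List Char),
      (PySem.List.enumerate suf (pre.length : Int)).foldl (solveStep2 (pre ++ suf)) s
        = s ++ pairEmit suf := by
  induction suf with
  | nil => intro pre s; simp [PySem.List.enumerate_nil, pairEmit]
  | cons hd tl ih =>
    intro pre s
    obtain ⟨c, k⟩ := hd
    rw [PySem.List.enumerate_cons]
    cases tl with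
    | nil =>
      simp [List.foldl, solveStep2, PySem.List.enumerate_nil, pairEmit]
    | cons hd2 tl2 =>
      obtain ⟨n, m⟩ := hd2
      have hne : ((pre.length : Int) == ((pre ++ (c, k) :: (n, m) :: tl2).length : Int) - 1)
          = false := by
        simp only [beq_eq_false_iff_ne, ne_eq]
        simp only [List.length_append, List.length_cons]
        push_cast
        omega
      have hget : PySem.List.pyGet? (pre ++ (c, k) :: (n, m) :: tl2) ((pre.length : Int) + 1)
          = some (n, m) := by
        have := PySem.List.pyGet?_append_right (pre := pre)
          (ys := (c, k) :: (n, m) :: tl2) (k := 1)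
        simpa using this
      have step : solveStep2 (pre ++ (c, k) :: (n, m) :: tl2) s ((pre.length : Int), c, k)
          = s ++ (if n > c then List.replicate (k * 2).toNat c
                  else List.replicate k.toNat c) := by
        simp only [solveStep2, hne, hget, Bool.false_eq_true, if_false]
        split <;> rfl
      rw [List.foldl_cons, step]
      have hpre : ((pre.length : Int) + 1) = (((pre ++ [(c, k)]).length : Int)) := by
        simp
      rw [hpre]
      have := ih (pre ++ [(c, k)])
        (s ++ (if n > c then List.replicate (k * 2).toNat c else List.replicate k.toNat c))
      simp only [List.append_assoc, List.cons_append, List.nil_append] at this ⊢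
      rw [this, pairEmit]

theorem pairEmit_append (r : List (Char × Int)) (cc : Char) (k : Int) :
    pairEmit (r ++ [(cc, k)]) = pairEmitOpen r cc ++ List.replicate k.toNat cc := by
  induction r with
  | nil => simp [pairEmit, pairEmitOpen]
  | cons hd tl ih =>
    obtain ⟨c, j⟩ := hd
    cases tl with
    | nil => simp [pairEmit, pairEmitOpen]
    | cons hd2 tl2 =>
      obtain ⟨n, m⟩ := hd2
      simp only [List.cons_append, pairEmit, pairEmitOpen]
      rw [← List.cons_append, ih]
      simp

theorem pairEmitOpen_append (r : List (Char × Int)) (c : Char) (k : Int) (nx : Char) :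
    pairEmitOpen (r ++ [(c, k)]) nx
      = pairEmitOpen r c
        ++ (if nx > c then List.replicate (k * 2).toNat c else List.replicate k.toNat c) := by
  induction r with
  | nil => simp [pairEmitOpen]
  | cons hd tl ih =>
    obtain ⟨a, j⟩ := hd
    cases tl with
    | nil => simp [pairEmitOpen]
    | cons hd2 tl2 =>
      obtain ⟨n, m⟩ := hd2
      simp only [List.cons_append, pairEmitOpen]
      rw [← List.cons_append, ih]
      simp

-- A's first loop keeps `current` set once it is set
def finishA : List (Char × Int) × Option Char × Int → List Char
  | (r, some cc, cnt) => pairEmit (r ++ [(cc, cnt)])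
  | (_, none, _) => []

theorem main_invariant (t : List Char) :
    ∀ (r : List (Char × Int)) (cc : Char) (cnt : Int),
      finishA (solveLoop1 t r (some cc) cnt) = solveAltGo t (pairEmitOpen r cc) cc cnt := by
  induction t with
  | nil =>
    intro r cc cnt
    simp [solveLoop1, solveAltGo, finishA, pairEmit_append]
  | cons c t ih =>
    intro r cc cnt
    by_cases h : c = cc
    · subst h
      simp only [solveLoop1, solveAltGo, beq_self_eq_true, if_true]
      exact ih r c (cnt + 1)
    · have hb : (c == cc) = false := by simp [h]
      simp only [solveLoop1, solveAltGo, hb, Bool.false_eq_true, if_false]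
      rw [ih (r ++ [(cc, cnt)]) c 1, pairEmitOpen_append]
      have hmul : (cnt * 2).toNat = (2 * cnt).toNat := by rw [Int.mul_comm]
      split_ifs with h1
      · rw [hmul]
      · rfl

theorem loop1_some (t : List Char) :
    ∀ (r : List (Char × Int)) (cc : Char) (cnt : Int),
      ∃ r' cc' cnt', solveLoop1 t r (some cc) cnt = (r', some cc', cnt') := by
  induction t with
  | nil => intro r cc cnt; exact ⟨r, cc, cnt, rfl⟩
  | cons c t ih =>
    intro r cc cnt
    simp only [solveLoop1]
    by_cases h : (c == cc) = true
    · rw [if_pos h]; exact ih r cc (cnt + 1)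
    · rw [if_neg h]; exact ih (r ++ [(cc, cnt)]) c 1

-- ===== VERDICT (by name: the statement is the Claim_ definition above) =====
theorem solve_spec : Claim_equal_solve := by
  intro x _ hpre
  unfold Spec_solve solve solve_alt
  cases hx : x.toList with
  | nil =>
    exfalso
    exact hpre (by rwa [← String.toList_eq_nil_iff])
  | cons c t =>
    simp only [solveLoop1]
    obtain ⟨r', cc', cnt', heq⟩ := loop1_some t [] c 1
    rw [heq]
    dsimp only
    have hm := main_invariant t [] c 1
    rw [heq] at hm
    simp only [finishA] at hm
    have hfold := solveStep2_foldl (r' ++ [(cc', cnt')]) [] []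
    simp only [List.length_nil, Int.natCast_zero, List.nil_append] at hfold
    rw [hfold, hm]
    simp [pairEmitOpen]
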